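-- pv_equiv track=rewrite | github.com/kilavuzdca-spec/1 | github_runner.py | count_color_mode_last
-- ===== SOURCE A (Python) =====
-- def count_color_mode_last(bfr, highs, lows):
--     HG = LW = last_color = None; last_high = last_low = None; last_index_HG = last_index_LW = None
--     for i in range(1,len(bfr)):
--         color = "green" if bfr[i]>bfr[i-1] else "red" if bfr[i]<bfr[i-1] else last_color
--         high, low = highs[i], lows[i]
--         if last_color is None or color != last_color:
--             if color=="green": HG=1; LW=None; last_high=high; last_index_HG=i
--             elif color=="red": LW=1; HG=None; last_low=low; last_index_LW=i
--         else:
--             if color=="green" and high>last_high: HG=HG+1 if HG<9 else 1; last_high=high; last_index_HG=i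
--             elif color=="red" and low<last_low: LW=LW+1 if LW<9 else 1; last_low=low; last_index_LW=i
--         last_color=color
--     last_bar=len(bfr)-1
--     return (HG if last_index_HG==last_bar else 0, LW if last_index_LW==last_bar else 0)
-- ===== SOURCE B (Python) =====
-- def count_color_mode_last(bfr, highs, lows):
--     # Suffix-run algorithm: the answer depends only on the maximal same-color
--     # run ending at the last bar.  Scan BACKWARD to find the last price move
--     # (its direction is the final color) and the start of that run (first
--     # opposite move, flats never break a run); then count record highs/lows
--     # FORWARD over that run only, wrapping 9->1 once at the end.
--     n = len(bfr)
--     i = n - 1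
--     while i >= 1 and bfr[i] == bfr[i - 1]:
--         i -= 1
--     if i < 1:
--         return (0, 0)          # no move at all: no color was ever assigned
--     up = bfr[i] > bfr[i - 1]
--     s = i
--     j = i - 1
--     while j >= 1:
--         if bfr[j] != bfr[j - 1]:
--             if (bfr[j] > bfr[j - 1]) != up:
--                 break
--             s = j
--         j -= 1
--     if up:
--         ext, last, k = highs[s], s, 1
--         for t in range(s + 1, n):
--             if highs[t] > ext:
--                 ext, last, k = highs[t], t, k + 1
--         return ((k - 1) % 9 + 1 if last == n - 1 else 0, 0)
--     else:
--         ext, last, k = lows[s], s, 1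
--         for t in range(s + 1, n):
--             if lows[t] < ext:
--                 ext, last, k = lows[t], t, k + 1
--         return (0, (k - 1) % 9 + 1 if last == n - 1 else 0)
-- ===== Notes on version B (the rewrite author's own statement) =====
-- stated objective: alternative
-- what changed: B replaces A's full forward state machine (two wrapped counters, two extremes, two last-advance indices over every bar) by a suffix-run algorithm: it scans backward from the last bar to find the last price move (the final color) and the start of the maximal same-color run ending at the last bar (flats never break a run), then counts record highs/lows forward over that run only, applying the 9-to-1 wrap as (k-1)%9+1 and the last-bar gate once at the end.
import Mathlib
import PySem

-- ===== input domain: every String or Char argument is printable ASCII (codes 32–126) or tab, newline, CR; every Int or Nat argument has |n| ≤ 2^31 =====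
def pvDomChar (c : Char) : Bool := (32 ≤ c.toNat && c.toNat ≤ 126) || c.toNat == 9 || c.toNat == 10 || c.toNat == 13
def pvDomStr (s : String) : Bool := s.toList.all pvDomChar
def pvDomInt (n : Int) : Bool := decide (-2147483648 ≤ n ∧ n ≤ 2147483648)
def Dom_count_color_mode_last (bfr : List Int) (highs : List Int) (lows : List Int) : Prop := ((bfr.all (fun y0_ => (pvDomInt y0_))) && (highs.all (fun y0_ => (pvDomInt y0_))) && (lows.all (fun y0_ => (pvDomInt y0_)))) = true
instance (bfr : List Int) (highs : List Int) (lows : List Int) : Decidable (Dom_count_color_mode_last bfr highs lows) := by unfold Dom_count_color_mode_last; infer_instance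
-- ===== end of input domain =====

-- B computes only the maximal same-color run ending at the last bar, found by a backward
-- scan, instead of A's forward state machine over the whole series (objective: alternative).

-- ===== PORT A =====
-- loop body of A; state = (HG, LW, last_color, last_high, last_low, last_index_HG, last_index_LW)
-- (Python's None becomes `none`; `.getD 0` on last_high/last_low/HG/LW is only reached when the
-- value is `some`, matching Python, which would raise on comparing with None otherwise)
def pvStepA (bfr : List Int) (highs : List Int) (lows : List Int)
    (st : Option Int × Option Int × Option String × Option Int × Option Int × Option Int × Option Int)
    (i : Int) :
    Option Int × Option Int × Option String × Option Int × Option Int × Option Int × Option Int :=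
  match st with
  | (HG, LW, lastColor, lastHigh, lastLow, liHG, liLW) =>
    let color : Option String :=
      if (PySem.List.pyGet? bfr i).getD 0 > (PySem.List.pyGet? bfr (i - 1)).getD 0 then some "green"
      else if (PySem.List.pyGet? bfr i).getD 0 < (PySem.List.pyGet? bfr (i - 1)).getD 0 then some "red"
      else lastColor
    let high : Int := (PySem.List.pyGet? highs i).getD 0   -- in range under Pre_
    let low : Int := (PySem.List.pyGet? lows i).getD 0     -- in range under Pre_
    if lastColor = none ∨ color ≠ lastColor then
      if color = some "green" then (some 1, none, color, some high, lastLow, some i, liLW)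
      else if color = some "red" then (none, some 1, color, lastHigh, some low, liHG, some i)
      else (HG, LW, color, lastHigh, lastLow, liHG, liLW)
    else
      if color = some "green" ∧ high > lastHigh.getD 0 then
        ((if HG.getD 0 < 9 then some (HG.getD 0 + 1) else some 1), LW, color, some high, lastLow, some i, liLW)
      else if color = some "red" ∧ low < lastLow.getD 0 then
        (HG, (if LW.getD 0 < 9 then some (LW.getD 0 + 1) else some 1), color, lastHigh, some low, liHG, some i)
      else (HG, LW, color, lastHigh, lastLow, liHG, liLW)

def count_color_mode_last (bfr : List Int) (highs : List Int) (lows : List Int) : Int × Int :=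
  let n : Int := (bfr.length : Int)
  let st := (PySem.List.pyRange 1 n 1).foldl (pvStepA bfr highs lows)
      (none, none, none, none, none, none, none)
  match st with
  | (HG, LW, _, _, _, liHG, liLW) =>
    ((if liHG = some (n - 1) then HG.getD 0 else 0),
     (if liLW = some (n - 1) then LW.getD 0 else 0))

-- ===== PORT B =====
-- first backward while-loop of B: skip flat bars from index i down to the last real move
def pvLastMove (bfr : List Int) (i : Int) : Int :=
  if h : 1 ≤ i ∧ (PySem.List.pyGet? bfr i).getD 0 = (PySem.List.pyGet? bfr (i - 1)).getD 0 then
    pvLastMove bfr (i - 1)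
  else i
termination_by i.toNat
decreasing_by omega

-- second backward while-loop of B: extend the run start `s` over earlier same-direction
-- moves (flats never break a run), stopping at an opposite move or the start of the list
def pvRunStart (bfr : List Int) (up : Bool) (s j : Int) : Int :=
  if h : 1 ≤ j then
    if (PySem.List.pyGet? bfr j).getD 0 ≠ (PySem.List.pyGet? bfr (j - 1)).getD 0 then
      if decide ((PySem.List.pyGet? bfr j).getD 0 > (PySem.List.pyGet? bfr (j - 1)).getD 0) ≠ up then s
      else pvRunStart bfr up j (j - 1)
    else pvRunStart bfr up s (j - 1)
  else s
termination_by j.toNat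
decreasing_by all_goals omega

-- body of B's forward record-count loop, rising run; state = (ext, last, k)
def pvRecH (highs : List Int) (st : Int × Int × Int) (t : Int) : Int × Int × Int :=
  if (PySem.List.pyGet? highs t).getD 0 > st.1 then ((PySem.List.pyGet? highs t).getD 0, t, st.2.2 + 1) else st

-- body of B's forward record-count loop, falling run; state = (ext, last, k)
def pvRecL (lows : List Int) (st : Int × Int × Int) (t : Int) : Int × Int × Int :=
  if (PySem.List.pyGet? lows t).getD 0 < st.1 then ((PySem.List.pyGet? lows t).getD 0, t, st.2.2 + 1) else st

def count_color_mode_last_alt (bfr : List Int) (highs : List Int) (lows : List Int) : Int × Int :=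
  let n : Int := (bfr.length : Int)
  let i := pvLastMove bfr (n - 1)
  if i < 1 then (0, 0)
  else
    let up : Bool := decide ((PySem.List.pyGet? bfr i).getD 0 > (PySem.List.pyGet? bfr (i - 1)).getD 0)
    let s := pvRunStart bfr up i (i - 1)
    if up then
      let st := (PySem.List.pyRange (s + 1) n 1).foldl (pvRecH highs) ((PySem.List.pyGet? highs s).getD 0, s, 1)
      ((if st.2.1 = n - 1 then PySem.Int.mod (st.2.2 - 1) 9 + 1 else 0), 0)
    else
      let st := (PySem.List.pyRange (s + 1) n 1).foldl (pvRecL lows) ((PySem.List.pyGet? lows s).getD 0, s, 1)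
      (0, (if st.2.1 = n - 1 then PySem.Int.mod (st.2.2 - 1) 9 + 1 else 0))

-- ===== PRECONDITION & SPEC =====
-- Pre_ excludes exactly the inputs where A raises IndexError: highs/lows shorter than bfr
-- while the loop runs (len(bfr) ≥ 2).
def Pre_count_color_mode_last (bfr : List Int) (highs : List Int) (lows : List Int) : Prop :=
  2 ≤ bfr.length → (bfr.length ≤ highs.length ∧ bfr.length ≤ lows.length)
instance (bfr : List Int) (highs : List Int) (lows : List Int) : Decidable (Pre_count_color_mode_last bfr highs lows) := by unfold Pre_count_color_mode_last; infer_instance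
def pvWitness_count_color_mode_last : List Int × List Int × List Int := ([1, 2, 2], [5, 6, 7], [0, 0, 0])

def Spec_count_color_mode_last (bfr : List Int) (highs : List Int) (lows : List Int) (out : Int × Int) : Prop := out = count_color_mode_last_alt bfr highs lows
instance (bfr : List Int) (highs : List Int) (lows : List Int) (out : Int × Int) : Decidable (Spec_count_color_mode_last bfr highs lows out) := by unfold Spec_count_color_mode_last; infer_instance

-- ===== CLAIM (what is proved, stated in full; the proofs are below) =====
def Claim_equal_count_color_mode_last : Prop := ∀ (bfr : List Int) (highs : List Int) (lows : List Int), Dom_count_color_mode_last bfr highs lows → Pre_count_color_mode_last bfr highs lows → Spec_count_color_mode_last bfr highs lows (count_color_mode_last bfr highs lows)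

-- ===== LEMMAS AND PROOFS =====

-- Proof-only forward run summary (col, k, ext, lastAdv): the bridge between A's 7-field
-- state machine and B's backward-scan computation.
def pvStepS (bfr : List Int) (highs : List Int) (lows : List Int)
    (st : Option Bool × Int × Int × Int) (i : Int) : Option Bool × Int × Int × Int :=
  match st with
  | (col, k, ext, lastAdv) =>
    let d : Int := (PySem.List.pyGet? bfr i).getD 0 - (PySem.List.pyGet? bfr (i - 1)).getD 0
    let up : Option Bool := if d ≠ 0 then some (decide (d > 0)) else col
    match up with
    | none => (col, k, ext, lastAdv)
    | some u =>
      if some u ≠ col then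
        (some u, 1, (if u then (PySem.List.pyGet? highs i).getD 0 else (PySem.List.pyGet? lows i).getD 0), i)
      else if u ∧ (PySem.List.pyGet? highs i).getD 0 > ext then
        (col, k + 1, (PySem.List.pyGet? highs i).getD 0, i)
      else if ¬u ∧ (PySem.List.pyGet? lows i).getD 0 < ext then
        (col, k + 1, (PySem.List.pyGet? lows i).getD 0, i)
      else (col, k, ext, lastAdv)

-- B's backward computation, cut off at endpoint m: the summary of bars 0..m-1.
def pvG (bfr : List Int) (highs : List Int) (lows : List Int) (m : Int) : Option Bool × Int × Int × Int :=
  let i := pvLastMove bfr (m - 1)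
  if i < 1 then (none, 0, 0, -1)
  else
    let up : Bool := decide ((PySem.List.pyGet? bfr i).getD 0 > (PySem.List.pyGet? bfr (i - 1)).getD 0)
    let s := pvRunStart bfr up i (i - 1)
    if up then
      let st := (PySem.List.pyRange (s + 1) m 1).foldl (pvRecH highs) ((PySem.List.pyGet? highs s).getD 0, s, 1)
      (some true, st.2.2, st.1, st.2.1)
    else
      let st := (PySem.List.pyRange (s + 1) m 1).foldl (pvRecL lows) ((PySem.List.pyGet? lows s).getD 0, s, 1)
      (some false, st.2.2, st.1, st.2.1)

lemma pvLastMove_le (bfr : List Int) (t : Int) : pvLastMove bfr t ≤ t := by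
  by_cases h : 1 ≤ t ∧ (PySem.List.pyGet? bfr t).getD 0 = (PySem.List.pyGet? bfr (t - 1)).getD 0
  · rw [pvLastMove, dif_pos h]
    have := pvLastMove_le bfr (t - 1)
    omega
  · rw [pvLastMove, dif_neg h]
termination_by t.toNat
decreasing_by omega

lemma pvLastMove_spec (bfr : List Int) (t : Int) :
    (1 ≤ pvLastMove bfr t →
      (PySem.List.pyGet? bfr (pvLastMove bfr t)).getD 0 ≠ (PySem.List.pyGet? bfr (pvLastMove bfr t - 1)).getD 0)
    ∧ (∀ j, pvLastMove bfr t < j → j ≤ t →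
      (PySem.List.pyGet? bfr j).getD 0 = (PySem.List.pyGet? bfr (j - 1)).getD 0) := by
  by_cases h : 1 ≤ t ∧ (PySem.List.pyGet? bfr t).getD 0 = (PySem.List.pyGet? bfr (t - 1)).getD 0
  · rw [pvLastMove, dif_pos h]
    obtain ⟨ih1, ih2⟩ := pvLastMove_spec bfr (t - 1)
    refine ⟨ih1, fun j hj1 hj2 => ?_⟩
    by_cases hjt : j = t
    · subst hjt; exact h.2
    · exact ih2 j hj1 (by omega)
  · rw [pvLastMove, dif_neg h]
    exact ⟨fun h1 heq => h ⟨h1, heq⟩, fun j hj1 hj2 => absurd hj1 (by omega)⟩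
termination_by t.toNat
decreasing_by omega

lemma pvRunStart_le (bfr : List Int) (u : Bool) (s j : Int) (h : j < s) :
    pvRunStart bfr u s j ≤ s := by
  by_cases h1 : 1 ≤ j
  · rw [pvRunStart, dif_pos h1]
    by_cases h2 : (PySem.List.pyGet? bfr j).getD 0 ≠ (PySem.List.pyGet? bfr (j - 1)).getD 0
    · rw [if_pos h2]
      by_cases h3 : decide ((PySem.List.pyGet? bfr j).getD 0 > (PySem.List.pyGet? bfr (j - 1)).getD 0) ≠ u
      · rw [if_pos h3]
      · rw [if_neg h3]
        have := pvRunStart_le bfr u j (j - 1) (by omega)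
        omega
    · rw [if_neg h2]
      exact pvRunStart_le bfr u s (j - 1) (by omega)
  · rw [pvRunStart, dif_neg h1]
termination_by j.toNat
decreasing_by all_goals omega

lemma pvRunStart_skip (bfr : List Int) (u : Bool) (s i jj : Int) (hi : 0 ≤ i) (hij : i ≤ jj)
    (hflat : ∀ j, i < j → j ≤ jj →
      (PySem.List.pyGet? bfr j).getD 0 = (PySem.List.pyGet? bfr (j - 1)).getD 0) :
    pvRunStart bfr u s jj = pvRunStart bfr u s i := by
  by_cases hji : jj = i
  · subst hji; rfl
  · have h1 : 1 ≤ jj := by omega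
    have hf := hflat jj (by omega) le_rfl
    rw [pvRunStart, dif_pos h1, if_neg (by simpa using hf)]
    exact pvRunStart_skip bfr u s i (jj - 1) hi (by omega) (fun j a b => hflat j a (by omega))
termination_by jj.toNat
decreasing_by omega

-- one step of the backward characterization: pvG at m+… peels the last processed index
lemma pvG_step (bfr highs lows : List Int) (m : Int) (hm : 2 ≤ m) :
    pvG bfr highs lows m = pvStepS bfr highs lows (pvG bfr highs lows (m - 1)) (m - 1) := by
  have ht1 : (1 : Int) ≤ m - 1 := by omega
  by_cases hflat : (PySem.List.pyGet? bfr (m - 1)).getD 0 = (PySem.List.pyGet? bfr (m - 1 - 1)).getD 0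
  · -- flat last bar: same run boundaries, one more record-test step
    have hi : pvLastMove bfr (m - 1) = pvLastMove bfr (m - 1 - 1) := by
      rw [pvLastMove, dif_pos ⟨ht1, hflat⟩]
    have hd0 : (PySem.List.pyGet? bfr (m - 1)).getD 0 - (PySem.List.pyGet? bfr (m - 1 - 1)).getD 0 = 0 := by omega
    unfold pvG
    rw [hi]
    set i := pvLastMove bfr (m - 1 - 1) with hidef
    by_cases hlt : i < 1
    · rw [if_pos hlt, if_pos hlt]
      simp [pvStepS, hd0]
    · rw [if_neg hlt, if_neg hlt]
      have hile : i ≤ m - 1 - 1 := pvLastMove_le bfr (m - 1 - 1)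
      by_cases hup : (PySem.List.pyGet? bfr i).getD 0 > (PySem.List.pyGet? bfr (i - 1)).getD 0
      · simp only [hup, decide_true, if_pos]
        have hs : pvRunStart bfr true i (i - 1) ≤ i := pvRunStart_le bfr true i (i - 1) (by omega)
        set s := pvRunStart bfr true i (i - 1) with hsdef
        rw [show m = (m - 1) + 1 by ring, PySem.List.pyRange_one_succ_right (by omega),
          List.foldl_append, List.foldl_cons, List.foldl_nil]
        rcases hst : (PySem.List.pyRange (s + 1) (m - 1) 1).foldl (pvRecH highs)
            ((PySem.List.pyGet? highs s).getD 0, s, 1) with ⟨e, l, kk⟩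
        by_cases hrec : (PySem.List.pyGet? highs (m - 1)).getD 0 > e
        · simp [pvStepS, pvRecH, hd0, hst, hrec]
        · simp [pvStepS, pvRecH, hd0, hst, hrec]
      · simp only [hup, decide_false, Bool.false_eq_true, if_false]
        have hs : pvRunStart bfr false i (i - 1) ≤ i := pvRunStart_le bfr false i (i - 1) (by omega)
        set s := pvRunStart bfr false i (i - 1) with hsdef
        rw [show m = (m - 1) + 1 by ring, PySem.List.pyRange_one_succ_right (by omega),
          List.foldl_append, List.foldl_cons, List.foldl_nil]
        rcases hst : (PySem.List.pyRange (s + 1) (m - 1) 1).foldl (pvRecL lows)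
            ((PySem.List.pyGet? lows s).getD 0, s, 1) with ⟨e, l, kk⟩
        by_cases hrec : (PySem.List.pyGet? lows (m - 1)).getD 0 < e
        · simp [pvStepS, pvRecL, hd0, hst, hrec]
        · simp [pvStepS, pvRecL, hd0, hst, hrec]
  · -- real move at the last bar
    have hi : pvLastMove bfr (m - 1) = m - 1 := by
      rw [pvLastMove, dif_neg (by tauto)]
    have hd0 : (PySem.List.pyGet? bfr (m - 1)).getD 0 - (PySem.List.pyGet? bfr (m - 1 - 1)).getD 0 ≠ 0 := by omega
    obtain ⟨hmv, hfl⟩ := pvLastMove_spec bfr (m - 1 - 1)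
    set i' := pvLastMove bfr (m - 1 - 1) with hi'def
    have hi'le : i' ≤ m - 1 - 1 := pvLastMove_le bfr (m - 1 - 1)
    by_cases hup : (PySem.List.pyGet? bfr (m - 1)).getD 0 > (PySem.List.pyGet? bfr (m - 1 - 1)).getD 0
    · -- rising move at m-1
      have hd1 : (0:Int) < (PySem.List.pyGet? bfr (m - 1)).getD 0 - (PySem.List.pyGet? bfr (m - 1 - 1)).getD 0 := by omega
      have hle : ¬ (PySem.List.pyGet? bfr (m - 1)).getD 0 ≤ (PySem.List.pyGet? bfr (m - 1 - 1)).getD 0 := by omega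
      conv_lhs => rw [pvG]
      rw [hi, if_neg (by omega), if_pos (by simp [hup])]
      simp only [hup, decide_true]
      by_cases hlt : i' < 1
      · -- everything before is flat: fresh green run of length 1
        have hs : pvRunStart bfr true (m - 1) (m - 1 - 1) = m - 1 := by
          rw [pvRunStart_skip bfr true (m - 1) 0 (m - 1 - 1) le_rfl (by omega)
            (fun j a b => hfl j (by omega) b)]
          rw [pvRunStart, dif_neg (by omega)]
        rw [hs, PySem.List.pyRange_one_eq_nil (by omega), List.foldl_nil]
        conv_rhs => rw [pvG]
        rw [show m - 1 - 1 = m - 1 - 1 by rfl]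
        rw [if_pos (by rw [← hi'def]; omega)]
        simp [pvStepS, hd0, hd1]
        exact ⟨hup, fun hc => absurd hc hle⟩
      · -- there is an earlier move, direction i'
        have hskip : pvRunStart bfr true (m - 1) (m - 1 - 1) = pvRunStart bfr true (m - 1) i' := by
          exact pvRunStart_skip bfr true (m - 1) i' (m - 1 - 1) (by omega) (by omega)
            (fun j a b => hfl j a b)
        by_cases hdir : (PySem.List.pyGet? bfr i').getD 0 > (PySem.List.pyGet? bfr (i' - 1)).getD 0
        · -- previous run is also green: run extends, peel one record step
          have hs : pvRunStart bfr true (m - 1) (m - 1 - 1) = pvRunStart bfr true i' (i' - 1) := by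
            rw [hskip, pvRunStart, dif_pos (by omega),
              if_pos (by simpa using hmv (by omega)), if_neg (by simp [hdir])]
          rw [hs]
          have hsle : pvRunStart bfr true i' (i' - 1) ≤ i' := pvRunStart_le bfr true i' (i' - 1) (by omega)
          set s := pvRunStart bfr true i' (i' - 1) with hsdef
          rw [show m = (m - 1) + 1 by ring, PySem.List.pyRange_one_succ_right (by omega),
            List.foldl_append, List.foldl_cons, List.foldl_nil]
          rcases hst : (PySem.List.pyRange (s + 1) (m - 1) 1).foldl (pvRecH highs)
              ((PySem.List.pyGet? highs s).getD 0, s, 1) with ⟨e, l, kk⟩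
          have hG' : pvG bfr highs lows (m - 1) = (some true, kk, e, l) := by
            rw [pvG, ← hi'def, if_neg hlt]
            simp only [hdir, decide_true, if_true]
            rw [← hsdef, hst]
          rw [show m - 1 + 1 - 1 = m - 1 by ring, hG']
          by_cases hrec : (PySem.List.pyGet? highs (m - 1)).getD 0 > e
          · simp [pvStepS, pvRecH, hd0, hd1, hup, hle, hst, hrec]
          · simp [pvStepS, pvRecH, hd0, hd1, hup, hle, hst, hrec]
        · -- previous run was red: fresh green run of length 1
          have hs : pvRunStart bfr true (m - 1) (m - 1 - 1) = m - 1 := by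
            rw [hskip, pvRunStart, dif_pos (by omega),
              if_pos (by simpa using hmv (by omega)), if_pos (by simp [hdir])]
          rw [hs, PySem.List.pyRange_one_eq_nil (by omega), List.foldl_nil]
          conv_rhs => rw [pvG]
          rw [if_neg (by rw [← hi'def]; omega), if_neg (by rw [← hi'def]; simp [hdir])]
          simp [pvStepS, hd0, hd1, hup, hle]
    · -- falling move at m-1
      have hdn : (PySem.List.pyGet? bfr (m - 1)).getD 0 < (PySem.List.pyGet? bfr (m - 1 - 1)).getD 0 := by omega
      have hd1 : ¬ ((0:Int) < (PySem.List.pyGet? bfr (m - 1)).getD 0 - (PySem.List.pyGet? bfr (m - 1 - 1)).getD 0) := by omega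
      have hle : (PySem.List.pyGet? bfr (m - 1)).getD 0 ≤ (PySem.List.pyGet? bfr (m - 1 - 1)).getD 0 := by omega
      have hnlt : ¬ (PySem.List.pyGet? bfr (m - 1 - 1)).getD 0 < (PySem.List.pyGet? bfr (m - 1)).getD 0 := by omega
      conv_lhs => rw [pvG]
      rw [hi, if_neg (by omega), if_neg (by simp [hup])]
      simp only [hup, decide_false]
      by_cases hlt : i' < 1
      · have hs : pvRunStart bfr false (m - 1) (m - 1 - 1) = m - 1 := by
          rw [pvRunStart_skip bfr false (m - 1) 0 (m - 1 - 1) le_rfl (by omega)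
            (fun j a b => hfl j (by omega) b)]
          rw [pvRunStart, dif_neg (by omega)]
        rw [hs, PySem.List.pyRange_one_eq_nil (by omega), List.foldl_nil]
        conv_rhs => rw [pvG]
        rw [if_pos (by rw [← hi'def]; omega)]
        simp [pvStepS, hd0, hd1, hle, hnlt, hdn]
      · have hskip : pvRunStart bfr false (m - 1) (m - 1 - 1) = pvRunStart bfr false (m - 1) i' := by
          exact pvRunStart_skip bfr false (m - 1) i' (m - 1 - 1) (by omega) (by omega)
            (fun j a b => hfl j a b)
        by_cases hdir : (PySem.List.pyGet? bfr i').getD 0 > (PySem.List.pyGet? bfr (i' - 1)).getD 0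
        · -- previous run was green: fresh red run of length 1
          have hs : pvRunStart bfr false (m - 1) (m - 1 - 1) = m - 1 := by
            rw [hskip, pvRunStart, dif_pos (by omega),
              if_pos (by simpa using hmv (by omega)), if_pos (by simp [hdir])]
          rw [hs, PySem.List.pyRange_one_eq_nil (by omega), List.foldl_nil]
          conv_rhs => rw [pvG]
          rw [if_neg (by rw [← hi'def]; omega), if_pos (by rw [← hi'def]; simp [hdir])]
          simp [pvStepS, hd0, hd1, hle, hnlt, hdn]
        · -- previous run is also red: run extends, peel one record step
          have hs : pvRunStart bfr false (m - 1) (m - 1 - 1) = pvRunStart bfr false i' (i' - 1) := by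
            rw [hskip, pvRunStart, dif_pos (by omega),
              if_pos (by simpa using hmv (by omega)), if_neg (by simp [hdir])]
          rw [hs]
          have hdec : decide ((PySem.List.pyGet? bfr (i' - 1)).getD 0 < (PySem.List.pyGet? bfr i').getD 0) = false := by
            simpa using hdir
          have hsle : pvRunStart bfr false i' (i' - 1) ≤ i' := pvRunStart_le bfr false i' (i' - 1) (by omega)
          set s := pvRunStart bfr false i' (i' - 1) with hsdef
          rw [show m = (m - 1) + 1 by ring, PySem.List.pyRange_one_succ_right (by omega),
            List.foldl_append, List.foldl_cons, List.foldl_nil]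
          rcases hst : (PySem.List.pyRange (s + 1) (m - 1) 1).foldl (pvRecL lows)
              ((PySem.List.pyGet? lows s).getD 0, s, 1) with ⟨e, l, kk⟩
          have hG' : pvG bfr highs lows (m - 1) = (some false, kk, e, l) := by
            rw [pvG, ← hi'def, if_neg hlt]
            simp only [hdec, Bool.false_eq_true, if_false]
            rw [← hsdef, hst]
          rw [show m - 1 + 1 - 1 = m - 1 by ring, hG']
          by_cases hrec : (PySem.List.pyGet? lows (m - 1)).getD 0 < e
          · simp [pvStepS, pvRecL, hd0, hd1, hle, hnlt, hdn, hst, hrec]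
          · simp [pvStepS, pvRecL, hd0, hd1, hle, hnlt, hdn, hst, hrec]

lemma pvS_eq_G (bfr highs lows : List Int) (m : Int) :
    (PySem.List.pyRange 1 m 1).foldl (pvStepS bfr highs lows) (none, 0, 0, -1)
      = pvG bfr highs lows m := by
  by_cases hm : m ≤ 1
  · rw [PySem.List.pyRange_one_eq_nil hm, List.foldl_nil, pvG]
    have : pvLastMove bfr (m - 1) = m - 1 := by
      rw [pvLastMove, dif_neg (by omega)]
    rw [this, if_pos (by omega)]
  · have : m = (m - 1) + 1 := by ring
    rw [this, PySem.List.pyRange_one_succ_right (by omega), List.foldl_append,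
      List.foldl_cons, List.foldl_nil, pvS_eq_G bfr highs lows (m - 1), ← this,
      ← pvG_step bfr highs lows m (by omega)]
termination_by m.toNat
decreasing_by omega

-- The coupling invariant between A's 7-field state and the 4-field run summary,
-- after having processed all indices < m.
def pvInv (stA : Option Int × Option Int × Option String × Option Int × Option Int × Option Int × Option Int)
    (stB : Option Bool × Int × Int × Int) (m : Int) : Prop :=
  match stA, stB with
  | (HG, LW, lc, lh, ll, liHG, liLW), (col, k, ext, lastAdv) =>
    lc = Option.map (fun u => if u then "green" else "red") col ∧
    (col = none → liHG = none ∧ liLW = none) ∧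
    (col = some true →
      1 ≤ lastAdv ∧ lastAdv ≤ m - 1 ∧
      HG = some ((k - 1) % 9 + 1) ∧ lh = some ext ∧ liHG = some lastAdv ∧
      (liLW = none ∨ ∃ j, liLW = some j ∧ j < lastAdv)) ∧
    (col = some false →
      1 ≤ lastAdv ∧ lastAdv ≤ m - 1 ∧
      LW = some ((k - 1) % 9 + 1) ∧ ll = some ext ∧ liLW = some lastAdv ∧
      (liHG = none ∨ ∃ j, liHG = some j ∧ j < lastAdv))

lemma pvStep_inv (bfr highs lows : List Int) (i : Int) (hi : 1 ≤ i)
    (stA : Option Int × Option Int × Option String × Option Int × Option Int × Option Int × Option Int)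
    (stB : Option Bool × Int × Int × Int)
    (h : pvInv stA stB i) :
    pvInv (pvStepA bfr highs lows stA i) (pvStepS bfr highs lows stB i) (i + 1) := by
  obtain ⟨HG, LW, lc, lh, ll, liHG, liLW⟩ := stA
  obtain ⟨col, k, ext, lastAdv⟩ := stB
  obtain ⟨hlc, hnone, htrue, hfalse⟩ := h
  cases col with
  | none =>
    simp only [Option.map_none] at hlc
    subst hlc
    obtain ⟨hH, hL⟩ := hnone rfl
    subst hH hL
    rcases lt_trichotomy ((PySem.List.pyGet? bfr (i - 1)).getD 0) ((PySem.List.pyGet? bfr i).getD 0) with hc | hc | hc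
    · -- rising bar: both sides start a green run
      have eA : pvStepA bfr highs lows (HG, LW, none, lh, ll, none, none) i
          = (some 1, none, some "green", some ((PySem.List.pyGet? highs i).getD 0), ll, some i, none) := by
        simp [pvStepA, hc]
      have eB : pvStepS bfr highs lows (none, k, ext, lastAdv) i = (some true, 1, (PySem.List.pyGet? highs i).getD 0, i) := by
        simp [pvStepS, hc, show (PySem.List.pyGet? bfr i).getD 0 - (PySem.List.pyGet? bfr (i - 1)).getD 0 ≠ 0 by omega]
      rw [eA, eB]
      exact ⟨by simp, by simp, fun _ => ⟨hi, by omega, by decide, rfl, rfl, Or.inl rfl⟩, by simp⟩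
    · -- flat bar, no color yet: both sides unchanged
      have eA : pvStepA bfr highs lows (HG, LW, none, lh, ll, none, none) i
          = (HG, LW, none, lh, ll, none, none) := by
        simp [pvStepA, show (PySem.List.pyGet? bfr i).getD 0 = (PySem.List.pyGet? bfr (i - 1)).getD 0 by omega]
      have eB : pvStepS bfr highs lows (none, k, ext, lastAdv) i = (none, k, ext, lastAdv) := by
        simp [pvStepS, show (PySem.List.pyGet? bfr i).getD 0 = (PySem.List.pyGet? bfr (i - 1)).getD 0 by omega]
      rw [eA, eB]
      exact ⟨by simp, fun _ => ⟨rfl, rfl⟩, by simp, by simp⟩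
    · -- falling bar: both sides start a red run
      have eA : pvStepA bfr highs lows (HG, LW, none, lh, ll, none, none) i
          = (none, some 1, some "red", lh, some ((PySem.List.pyGet? lows i).getD 0), none, some i) := by
        simp [pvStepA, hc, show ¬ (PySem.List.pyGet? bfr (i - 1)).getD 0 < (PySem.List.pyGet? bfr i).getD 0 by omega]
      have eB : pvStepS bfr highs lows (none, k, ext, lastAdv) i = (some false, 1, (PySem.List.pyGet? lows i).getD 0, i) := by
        simp [pvStepS, show ¬ (PySem.List.pyGet? bfr (i - 1)).getD 0 < (PySem.List.pyGet? bfr i).getD 0 by omega, show (PySem.List.pyGet? bfr i).getD 0 - (PySem.List.pyGet? bfr (i - 1)).getD 0 ≠ 0 by omega]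
      rw [eA, eB]
      exact ⟨by simp, by simp, by simp, fun _ => ⟨hi, by omega, by decide, rfl, rfl, Or.inl rfl⟩⟩
  | some u =>
    cases u with
    | true =>
      simp only [Option.map_some, if_pos] at hlc
      subst hlc
      obtain ⟨h1, h2, h3, h4, h5, h6⟩ := htrue rfl
      subst h3 h4 h5
      rcases lt_trichotomy ((PySem.List.pyGet? bfr (i - 1)).getD 0) ((PySem.List.pyGet? bfr i).getD 0) with hc | hc | hc
      · -- rising bar inside a green run
        by_cases hadv : (PySem.List.pyGet? highs i).getD 0 > ext
        · have eA : pvStepA bfr highs lows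
              (some ((k - 1) % 9 + 1), LW, some "green", some ext, ll, some lastAdv, liLW) i
              = ((if (k - 1) % 9 + 1 < 9 then some ((k - 1) % 9 + 1 + 1) else some 1), LW,
                 some "green", some ((PySem.List.pyGet? highs i).getD 0), ll, some i, liLW) := by
            simp [pvStepA, hc, hadv]
          have eB : pvStepS bfr highs lows (some true, k, ext, lastAdv) i
              = (some true, k + 1, (PySem.List.pyGet? highs i).getD 0, i) := by
            simp [pvStepS, hc, show (PySem.List.pyGet? bfr i).getD 0 - (PySem.List.pyGet? bfr (i - 1)).getD 0 ≠ 0 by omega, hadv]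
          rw [eA, eB]
          refine ⟨by simp, by simp, fun _ => ⟨hi, by omega, ?_, rfl, rfl, ?_⟩, by simp⟩
          · split_ifs <;> simp only [Option.some.injEq] <;> omega
          · rcases h6 with h6 | ⟨j, hj, hjlt⟩
            · exact Or.inl h6
            · exact Or.inr ⟨j, hj, by omega⟩
        · have eA : pvStepA bfr highs lows
              (some ((k - 1) % 9 + 1), LW, some "green", some ext, ll, some lastAdv, liLW) i
              = (some ((k - 1) % 9 + 1), LW, some "green", some ext, ll, some lastAdv, liLW) := by
            simp [pvStepA, hc, hadv]
          have eB : pvStepS bfr highs lows (some true, k, ext, lastAdv) i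
              = (some true, k, ext, lastAdv) := by
            simp [pvStepS, hc, show (PySem.List.pyGet? bfr i).getD 0 - (PySem.List.pyGet? bfr (i - 1)).getD 0 ≠ 0 by omega, hadv]
          rw [eA, eB]
          exact ⟨by simp, by simp, fun _ => ⟨h1, by omega, rfl, rfl, rfl, h6⟩, by simp⟩
      · -- flat bar inside a green run
        by_cases hadv : (PySem.List.pyGet? highs i).getD 0 > ext
        · have eA : pvStepA bfr highs lows
              (some ((k - 1) % 9 + 1), LW, some "green", some ext, ll, some lastAdv, liLW) i
              = ((if (k - 1) % 9 + 1 < 9 then some ((k - 1) % 9 + 1 + 1) else some 1), LW,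
                 some "green", some ((PySem.List.pyGet? highs i).getD 0), ll, some i, liLW) := by
            simp [pvStepA, show (PySem.List.pyGet? bfr i).getD 0 = (PySem.List.pyGet? bfr (i - 1)).getD 0 by omega, hadv]
          have eB : pvStepS bfr highs lows (some true, k, ext, lastAdv) i
              = (some true, k + 1, (PySem.List.pyGet? highs i).getD 0, i) := by
            simp [pvStepS, show (PySem.List.pyGet? bfr i).getD 0 = (PySem.List.pyGet? bfr (i - 1)).getD 0 by omega, hadv]
          rw [eA, eB]
          refine ⟨by simp, by simp, fun _ => ⟨hi, by omega, ?_, rfl, rfl, ?_⟩, by simp⟩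
          · split_ifs <;> simp only [Option.some.injEq] <;> omega
          · rcases h6 with h6 | ⟨j, hj, hjlt⟩
            · exact Or.inl h6
            · exact Or.inr ⟨j, hj, by omega⟩
        · have eA : pvStepA bfr highs lows
              (some ((k - 1) % 9 + 1), LW, some "green", some ext, ll, some lastAdv, liLW) i
              = (some ((k - 1) % 9 + 1), LW, some "green", some ext, ll, some lastAdv, liLW) := by
            simp [pvStepA, show (PySem.List.pyGet? bfr i).getD 0 = (PySem.List.pyGet? bfr (i - 1)).getD 0 by omega, hadv]
          have eB : pvStepS bfr highs lows (some true, k, ext, lastAdv) i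
              = (some true, k, ext, lastAdv) := by
            simp [pvStepS, show (PySem.List.pyGet? bfr i).getD 0 = (PySem.List.pyGet? bfr (i - 1)).getD 0 by omega, hadv]
          rw [eA, eB]
          exact ⟨by simp, by simp, fun _ => ⟨h1, by omega, rfl, rfl, rfl, h6⟩, by simp⟩
      · -- falling bar: green run ends, red run starts
        have eA : pvStepA bfr highs lows
            (some ((k - 1) % 9 + 1), LW, some "green", some ext, ll, some lastAdv, liLW) i
            = (none, some 1, some "red", some ext, some ((PySem.List.pyGet? lows i).getD 0), some lastAdv, some i) := by
          simp [pvStepA, hc, show ¬ (PySem.List.pyGet? bfr (i - 1)).getD 0 < (PySem.List.pyGet? bfr i).getD 0 by omega]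
        have eB : pvStepS bfr highs lows (some true, k, ext, lastAdv) i
            = (some false, 1, (PySem.List.pyGet? lows i).getD 0, i) := by
          simp [pvStepS, show ¬ (PySem.List.pyGet? bfr (i - 1)).getD 0 < (PySem.List.pyGet? bfr i).getD 0 by omega, show (PySem.List.pyGet? bfr i).getD 0 - (PySem.List.pyGet? bfr (i - 1)).getD 0 ≠ 0 by omega]
        rw [eA, eB]
        exact ⟨by simp, by simp, by simp,
          fun _ => ⟨hi, by omega, by decide, rfl, rfl, Or.inr ⟨lastAdv, rfl, by omega⟩⟩⟩
    | false =>
      simp only [Option.map_some, Bool.false_eq_true, if_false] at hlc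
      subst hlc
      obtain ⟨h1, h2, h3, h4, h5, h6⟩ := hfalse rfl
      subst h3 h4 h5
      rcases lt_trichotomy ((PySem.List.pyGet? bfr (i - 1)).getD 0) ((PySem.List.pyGet? bfr i).getD 0) with hc | hc | hc
      · -- rising bar: red run ends, green run starts
        have eA : pvStepA bfr highs lows
            (HG, some ((k - 1) % 9 + 1), some "red", lh, some ext, liHG, some lastAdv) i
            = (some 1, none, some "green", some ((PySem.List.pyGet? highs i).getD 0), some ext, some i, some lastAdv) := by
          simp [pvStepA, hc]
        have eB : pvStepS bfr highs lows (some false, k, ext, lastAdv) i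
            = (some true, 1, (PySem.List.pyGet? highs i).getD 0, i) := by
          simp [pvStepS, hc, show (PySem.List.pyGet? bfr i).getD 0 - (PySem.List.pyGet? bfr (i - 1)).getD 0 ≠ 0 by omega]
        rw [eA, eB]
        exact ⟨by simp, by simp,
          fun _ => ⟨hi, by omega, by decide, rfl, rfl, Or.inr ⟨lastAdv, rfl, by omega⟩⟩, by simp⟩
      · -- flat bar inside a red run
        by_cases hadv : (PySem.List.pyGet? lows i).getD 0 < ext
        · have eA : pvStepA bfr highs lows
              (HG, some ((k - 1) % 9 + 1), some "red", lh, some ext, liHG, some lastAdv) i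
              = (HG, (if (k - 1) % 9 + 1 < 9 then some ((k - 1) % 9 + 1 + 1) else some 1),
                 some "red", lh, some ((PySem.List.pyGet? lows i).getD 0), liHG, some i) := by
            simp [pvStepA, show (PySem.List.pyGet? bfr i).getD 0 = (PySem.List.pyGet? bfr (i - 1)).getD 0 by omega, hadv]
          have eB : pvStepS bfr highs lows (some false, k, ext, lastAdv) i
              = (some false, k + 1, (PySem.List.pyGet? lows i).getD 0, i) := by
            simp [pvStepS, show (PySem.List.pyGet? bfr i).getD 0 = (PySem.List.pyGet? bfr (i - 1)).getD 0 by omega, hadv]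
          rw [eA, eB]
          refine ⟨by simp, by simp, by simp, fun _ => ⟨hi, by omega, ?_, rfl, rfl, ?_⟩⟩
          · split_ifs <;> simp only [Option.some.injEq] <;> omega
          · rcases h6 with h6 | ⟨j, hj, hjlt⟩
            · exact Or.inl h6
            · exact Or.inr ⟨j, hj, by omega⟩
        · have eA : pvStepA bfr highs lows
              (HG, some ((k - 1) % 9 + 1), some "red", lh, some ext, liHG, some lastAdv) i
              = (HG, some ((k - 1) % 9 + 1), some "red", lh, some ext, liHG, some lastAdv) := by
            simp [pvStepA, show (PySem.List.pyGet? bfr i).getD 0 = (PySem.List.pyGet? bfr (i - 1)).getD 0 by omega, hadv]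
          have eB : pvStepS bfr highs lows (some false, k, ext, lastAdv) i
              = (some false, k, ext, lastAdv) := by
            simp [pvStepS, show (PySem.List.pyGet? bfr i).getD 0 = (PySem.List.pyGet? bfr (i - 1)).getD 0 by omega, hadv]
          rw [eA, eB]
          exact ⟨by simp, by simp, by simp, fun _ => ⟨h1, by omega, rfl, rfl, rfl, h6⟩⟩
      · -- falling bar inside a red run
        by_cases hadv : (PySem.List.pyGet? lows i).getD 0 < ext
        · have eA : pvStepA bfr highs lows
              (HG, some ((k - 1) % 9 + 1), some "red", lh, some ext, liHG, some lastAdv) i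
              = (HG, (if (k - 1) % 9 + 1 < 9 then some ((k - 1) % 9 + 1 + 1) else some 1),
                 some "red", lh, some ((PySem.List.pyGet? lows i).getD 0), liHG, some i) := by
            simp [pvStepA, hc, show ¬ (PySem.List.pyGet? bfr (i - 1)).getD 0 < (PySem.List.pyGet? bfr i).getD 0 by omega, hadv]
          have eB : pvStepS bfr highs lows (some false, k, ext, lastAdv) i
              = (some false, k + 1, (PySem.List.pyGet? lows i).getD 0, i) := by
            simp [pvStepS, show ¬ (PySem.List.pyGet? bfr (i - 1)).getD 0 < (PySem.List.pyGet? bfr i).getD 0 by omega, show (PySem.List.pyGet? bfr i).getD 0 - (PySem.List.pyGet? bfr (i - 1)).getD 0 ≠ 0 by omega, hadv]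
          rw [eA, eB]
          refine ⟨by simp, by simp, by simp, fun _ => ⟨hi, by omega, ?_, rfl, rfl, ?_⟩⟩
          · split_ifs <;> simp only [Option.some.injEq] <;> omega
          · rcases h6 with h6 | ⟨j, hj, hjlt⟩
            · exact Or.inl h6
            · exact Or.inr ⟨j, hj, by omega⟩
        · have eA : pvStepA bfr highs lows
              (HG, some ((k - 1) % 9 + 1), some "red", lh, some ext, liHG, some lastAdv) i
              = (HG, some ((k - 1) % 9 + 1), some "red", lh, some ext, liHG, some lastAdv) := by
            simp [pvStepA, hc, show ¬ (PySem.List.pyGet? bfr (i - 1)).getD 0 < (PySem.List.pyGet? bfr i).getD 0 by omega, hadv]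
          have eB : pvStepS bfr highs lows (some false, k, ext, lastAdv) i
              = (some false, k, ext, lastAdv) := by
            simp [pvStepS, hc, show ¬ (PySem.List.pyGet? bfr (i - 1)).getD 0 < (PySem.List.pyGet? bfr i).getD 0 by omega, show (PySem.List.pyGet? bfr i).getD 0 - (PySem.List.pyGet? bfr (i - 1)).getD 0 ≠ 0 by omega, hadv]
          rw [eA, eB]
          exact ⟨by simp, by simp, by simp, fun _ => ⟨h1, by omega, rfl, rfl, rfl, h6⟩⟩

lemma pvFold_inv (bfr highs lows : List Int) (n : Int) (a : Int)
    (stA : Option Int × Option Int × Option String × Option Int × Option Int × Option Int × Option Int)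
    (stB : Option Bool × Int × Int × Int)
    (ha : 1 ≤ a) (h : pvInv stA stB a) :
    pvInv ((PySem.List.pyRange a n 1).foldl (pvStepA bfr highs lows) stA)
          ((PySem.List.pyRange a n 1).foldl (pvStepS bfr highs lows) stB) (max a n) := by
  by_cases hlt : a < n
  · rw [PySem.List.pyRange_one_cons hlt]
    simp only [List.foldl_cons]
    have hstep := pvStep_inv bfr highs lows a ha stA stB h
    have hrec := pvFold_inv bfr highs lows n (a + 1)
      (pvStepA bfr highs lows stA a) (pvStepS bfr highs lows stB a) (by omega) hstep
    rwa [show max (a + 1) n = max a n by omega] at hrec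
  · have hnil : PySem.List.pyRange a n = [] := by simp [PySem.List.pyRange]; omega
    rw [hnil]
    simpa [show max a n = a by omega] using h
termination_by (n - a).toNat
decreasing_by omega

-- B's output as a function of the run summary pvG at the full length
lemma pvAlt_G (bfr highs lows : List Int) :
    count_color_mode_last_alt bfr highs lows =
      (match pvG bfr highs lows (bfr.length : Int) with
       | (none, _, _, _) => ((0 : Int), (0 : Int))
       | (some true, k, _, last) =>
          ((if last = (bfr.length : Int) - 1 then PySem.Int.mod (k - 1) 9 + 1 else 0), 0)
       | (some false, k, _, last) =>
          (0, (if last = (bfr.length : Int) - 1 then PySem.Int.mod (k - 1) 9 + 1 else 0))) := by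
  unfold count_color_mode_last_alt pvG
  by_cases hi : pvLastMove bfr ((bfr.length : Int) - 1) < 1
  · simp [hi]
  · by_cases hup : (PySem.List.pyGet? bfr (pvLastMove bfr ((bfr.length : Int) - 1))).getD 0 >
        (PySem.List.pyGet? bfr (pvLastMove bfr ((bfr.length : Int) - 1) - 1)).getD 0
    · simp [hi, hup]
    · simp [hi, hup]

-- ===== VERDICT (by name: the statement is the Claim_ definition above) =====
theorem count_color_mode_last_spec : Claim_equal_count_color_mode_last := by
  intro bfr highs lows _hDom _hPre
  unfold Spec_count_color_mode_last count_color_mode_last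
  have h0 : pvInv (none, none, none, none, none, none, none) (none, 0, 0, -1) 1 := by
    simp [pvInv]
  have h := pvFold_inv bfr highs lows (bfr.length : Int) 1 _ _ le_rfl h0
  rw [pvS_eq_G] at h
  rcases hsA : List.foldl (pvStepA bfr highs lows) (none, none, none, none, none, none, none)
      (PySem.List.pyRange 1 (bfr.length : Int)) with ⟨HG, LW, lc, lh, ll, liHG, liLW⟩
  rcases hsB : pvG bfr highs lows (bfr.length : Int) with ⟨col, k, ext, lastAdv⟩
  rw [hsA, hsB] at h
  rw [pvAlt_G, hsB]
  obtain ⟨hlc, hnone, htrue, hfalse⟩ := h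
  have hmod : PySem.Int.mod (k - 1) 9 = (k - 1) % 9 := PySem.Int.mod_eq_emod_of_pos (by norm_num)
  set n : Int := (bfr.length : Int) with hn
  match col with
  | none =>
    obtain ⟨h1, h2⟩ := hnone rfl
    simp [hsA, h1, h2]
  | some true =>
    obtain ⟨h1, h2, h3, h4, h5, h6⟩ := htrue rfl
    have hn2 : 2 ≤ n := by omega
    subst h3 h5
    by_cases hla : lastAdv = n - 1
    · subst hla
      rcases h6 with h6 | ⟨j, hj, hjlt⟩
      · simp [hsA, h6, hmod]
      · subst hj
        simp [hsA, hmod, show ¬ j = n - 1 by omega]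
    · rcases h6 with h6 | ⟨j, hj, hjlt⟩
      · simp [hsA, h6, hla]
      · subst hj
        simp [hsA, hla, show ¬ j = n - 1 by omega]
  | some false =>
    obtain ⟨h1, h2, h3, h4, h5, h6⟩ := hfalse rfl
    have hn2 : 2 ≤ n := by omega
    subst h3 h5
    by_cases hla : lastAdv = n - 1
    · subst hla
      rcases h6 with h6 | ⟨j, hj, hjlt⟩
      · simp [hsA, h6, hmod]
      · subst hj
        simp [hsA, hmod, show ¬ j = n - 1 by omega]
    · rcases h6 with h6 | ⟨j, hj, hjlt⟩
      · simp [hsA, h6, hla]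
      · subst hj
        simp [hsA, hla, show ¬ j = n - 1 by omega]
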